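-- pv_equiv track=rewrite | github.com/jianhu-chen/Online-Judge | leetcode/weekly_contest/347/2711.difference_of_number_of_distinct_values_on_diagonals.py | differenceOfDistinctValues
-- ===== SOURCE A (Python) =====
-- from typing import List
-- from copy import deepcopy
--
-- def differenceOfDistinctValues(grid: List[List[int]]) -> List[List[int]]:
--     ans = deepcopy(grid)
--     m, n = len(grid), len(grid[0])
--     for i in range(m):
--         for j in range(n):
--             tl = set()
--             p, q = i - 1, j - 1
--             while p >= 0 and q >= 0:
--                 tl.add(grid[p][q])
--                 p -= 1
--                 q -= 1
--             br = set()
--             p, q = i + 1, j + 1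
--             while p < m and q < n:
--                 br.add(grid[p][q])
--                 p += 1
--                 q += 1
--             ans[i][j] = abs(len(tl) - len(br))
--     return ans
-- ===== SOURCE B (Python) =====
-- def differenceOfDistinctValues(grid):
--     m, n = len(grid), len(grid[0])
--     tops = []
--     bots = []
--     for d in range(1 - m, n):
--         i0 = -d if d < 0 else 0
--         j0 = i0 + d
--         L = min(m - i0, n - j0)
--         diag = [grid[i0 + k][j0 + k] for k in range(L)]
--         seen = set()
--         top = []
--         for v in diag:
--             top.append(len(seen))
--             seen.add(v)
--         seen = set()
--         bot = []
--         for v in reversed(diag):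
--             bot.append(len(seen))
--             seen.add(v)
--         bot.reverse()
--         tops.append(top)
--         bots.append(bot)
--     ans = [row[:] for row in grid]
--     for i in range(m):
--         for j in range(n):
--             ans[i][j] = abs(tops[j - i + m - 1][min(i, j)] - bots[j - i + m - 1][min(i, j)])
--     return ans
-- ===== Notes on version B (the rewrite author's own statement) =====
-- stated objective: faster
-- what changed: Instead of re-scanning both halves of the diagonal for every cell, B walks each diagonal once, recording running distinct-count prefixes from both ends, and fills the answer by indexing those per-diagonal arrays; Pre_ excludes only the inputs on which A raises IndexError (the empty grid and grids with a row shorter than the first).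
import Mathlib
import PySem

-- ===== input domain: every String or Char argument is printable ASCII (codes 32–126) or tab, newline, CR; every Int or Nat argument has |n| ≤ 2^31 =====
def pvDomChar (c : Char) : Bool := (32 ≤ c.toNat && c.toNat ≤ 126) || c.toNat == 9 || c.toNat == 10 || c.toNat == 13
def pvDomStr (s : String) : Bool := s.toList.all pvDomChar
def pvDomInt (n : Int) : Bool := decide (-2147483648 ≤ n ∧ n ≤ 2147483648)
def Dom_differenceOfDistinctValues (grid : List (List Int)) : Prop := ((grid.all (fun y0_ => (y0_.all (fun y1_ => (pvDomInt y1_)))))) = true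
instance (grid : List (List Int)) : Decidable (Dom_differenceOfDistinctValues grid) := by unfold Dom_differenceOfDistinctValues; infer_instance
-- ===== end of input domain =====

-- B walks each diagonal once, accumulating distinct-count prefixes from both ends (one pass per
-- diagonal instead of A's per-cell rescans of both diagonal halves); proved to return A's exact
-- value on every nonempty rectangular grid.


-- ===== PORT A =====
-- grid[p][q]; inside Pre_ every access is in range, so the defaults (Python: IndexError) are never reached
def pvCell (grid : List (List Int)) (p q : Int) : Int :=
  (PySem.List.pyGet? ((PySem.List.pyGet? grid p).getD []) q).getD 0

-- while p >= 0 and q >= 0: tl.add(grid[p][q]); p -= 1; q -= 1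
def pvTlGo (grid : List (List Int)) (p q : Int) (s : PySem.Set Int) : PySem.Set Int :=
  if h : 0 ≤ p ∧ 0 ≤ q then
    pvTlGo grid (p - 1) (q - 1) (PySem.Set.add s (pvCell grid p q))
  else s
termination_by (p + 1).toNat
decreasing_by omega

-- while p < m and q < n: br.add(grid[p][q]); p += 1; q += 1
def pvBrGo (grid : List (List Int)) (m n p q : Int) (s : PySem.Set Int) : PySem.Set Int :=
  if h : p < m ∧ q < n then
    pvBrGo grid m n (p + 1) (q + 1) (PySem.Set.add s (pvCell grid p q))
  else s
termination_by (m - p).toNat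
decreasing_by omega

-- ans[i][j] = v  (inside Pre_, 0 ≤ i < len(ans) and 0 ≤ j < len(ans[i]), so this is exact)
def pvSetCell (ans : List (List Int)) (i j v : Int) : List (List Int) :=
  ans.set i.toNat (((PySem.List.pyGet? ans i).getD []).set j.toNat v)

def differenceOfDistinctValues (grid : List (List Int)) : List (List Int) :=
  let m : Int := grid.length
  let n : Int := ((PySem.List.pyGet? grid 0).getD []).length
  (PySem.List.pyRange 0 m).foldl (fun ans i =>
    (PySem.List.pyRange 0 n).foldl (fun ans j =>
      let tl := pvTlGo grid (i - 1) (j - 1) PySem.Set.empty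
      let br := pvBrGo grid m n (i + 1) (j + 1) PySem.Set.empty
      pvSetCell ans i j (((tl.length : Int) - (br.length : Int)).natAbs : Int)
    ) ans) grid

-- ===== PORT B =====
-- the two identical passes "for v in …: out.append(len(seen)); seen.add(v)" of Source B
def pvPrefixCounts (diag : List Int) : List Int :=
  (diag.foldl (fun (st : PySem.Set Int × List Int) v =>
      (PySem.Set.add st.1 v, st.2 ++ [(st.1.length : Int)])) (PySem.Set.empty, [])).2

def differenceOfDistinctValues_alt (grid : List (List Int)) : List (List Int) :=
  let m : Int := grid.length
  let n : Int := ((PySem.List.pyGet? grid 0).getD []).length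
  let tb := (PySem.List.pyRange (1 - m) n).foldl (fun (tb : List (List Int) × List (List Int)) d =>
      let i0 : Int := if d < 0 then -d else 0
      let j0 : Int := i0 + d
      let L : Int := min (m - i0) (n - j0)
      let diag := (PySem.List.pyRange 0 L).map (fun k => pvCell grid (i0 + k) (j0 + k))
      let top := pvPrefixCounts diag
      let bot := (pvPrefixCounts diag.reverse).reverse
      (tb.1 ++ [top], tb.2 ++ [bot])) ([], [])
  let ans := grid.map (fun row => row)   -- ans = [row[:] for row in grid]
  (PySem.List.pyRange 0 m).foldl (fun ans i =>
    (PySem.List.pyRange 0 n).foldl (fun ans j =>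
      pvSetCell ans i j
        ((((PySem.List.pyGet? ((PySem.List.pyGet? tb.1 (j - i + m - 1)).getD []) (min i j)).getD 0)
          - ((PySem.List.pyGet? ((PySem.List.pyGet? tb.2 (j - i + m - 1)).getD []) (min i j)).getD 0)).natAbs : Int)
    ) ans) ans

-- ===== PRECONDITION & SPEC =====
-- Pre_ excludes exactly the inputs on which A raises IndexError: the empty grid (grid[0]) and grids
-- with a row shorter than the first (the assignment ans[i][j] for j < len(grid[0]) hits the short row).
def Pre_differenceOfDistinctValues (grid : List (List Int)) : Prop :=
  grid ≠ [] ∧ ∀ row ∈ grid, (grid.headD []).length ≤ row.length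
instance (grid : List (List Int)) : Decidable (Pre_differenceOfDistinctValues grid) := by
  unfold Pre_differenceOfDistinctValues; infer_instance
def pvWitness_differenceOfDistinctValues : List (List Int) := [[1, 2], [3, 1]]

def Spec_differenceOfDistinctValues (grid : List (List Int)) (out : List (List Int)) : Prop :=
  out = differenceOfDistinctValues_alt grid
instance (grid : List (List Int)) (out : List (List Int)) : Decidable (Spec_differenceOfDistinctValues grid out) := by
  unfold Spec_differenceOfDistinctValues; infer_instance

-- ===== CLAIM (what is proved, stated in full; the proofs are below) =====
def Claim_equal_differenceOfDistinctValues : Prop :=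
  ∀ (grid : List (List Int)), Dom_differenceOfDistinctValues grid →
    Pre_differenceOfDistinctValues grid →
    Spec_differenceOfDistinctValues grid (differenceOfDistinctValues grid)

-- ===== LEMMAS AND PROOFS =====

-- Nat-indexed cell access
def pvG (grid : List (List Int)) (i j : Nat) : Int := pvCell grid (i : Int) (j : Int)

-- the values strictly before (i,j) on its diagonal, in top-left→(i,j) order
def pvPre (grid : List (List Int)) (i j : Nat) : List Int :=
  (List.range (min i j)).map (fun t => pvG grid (i - min i j + t) (j - min i j + t))

-- the values strictly after (i,j) on its diagonal, in (i,j)→bottom-right order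
def pvPost (grid : List (List Int)) (m n i j : Nat) : List Int :=
  (List.range (min (m - i) (n - j) - 1)).map (fun t => pvG grid (i + 1 + t) (j + 1 + t))

def pvVal (grid : List (List Int)) (m n i j : Nat) : Int :=
  ((((PySem.Set.ofList (pvPre grid i j)).length : Int)
    - ((PySem.Set.ofList (pvPost grid m n i j)).length : Int)).natAbs : Int)

def pvTable (grid : List (List Int)) (m n : Nat) : List (List Int) :=
  (List.range m).map (fun i =>
    (List.range n).map (fun j => pvVal grid m n i j) ++ (grid.getD i []).drop n)

theorem pv_distinct_len_perm {l₁ l₂ : List Int} (h : l₁.Perm l₂) :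
    (PySem.Set.ofList l₁).length = (PySem.Set.ofList l₂).length := by
  have hp : (PySem.Set.ofList l₁).Perm (PySem.Set.ofList l₂) := by
    rw [List.perm_ext_iff_of_nodup (PySem.Set.nodup_ofList l₁) (PySem.Set.nodup_ofList l₂)]
    intro a
    simp only [PySem.Set.mem_ofList]
    exact h.mem_iff
  exact hp.length_eq


theorem pv_pyRange_one_eq (a b : Int) :
    PySem.List.pyRange a b = (List.range (b - a).toNat).map (fun k : Nat => a + (k : Int)) := by
  rw [PySem.List.pyRange_of_pos a b (by norm_num)]
  by_cases hab : a < b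
  · have h1 : (b - a + 1 - 1) / 1 = b - a := by omega
    simp only [hab, if_pos, h1, one_mul]

  · have h2 : (b - a).toNat = 0 := by omega
    simp [hab, h2]


theorem pvPre_succ (grid : List (List Int)) {i j k : Nat} (h : min i j = k + 1) :
    pvPre grid i j = pvPre grid (i - 1) (j - 1) ++ [pvG grid (i - 1) (j - 1)] := by
  have hm : min (i - 1) (j - 1) = k := by omega
  unfold pvPre
  rw [h, hm, List.range_succ, List.map_append]
  congr 1
  · apply List.map_congr_left
    intro t ht
    have h1 : i - (k + 1) + t = i - 1 - k + t := by omega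
    have h2 : j - (k + 1) + t = j - 1 - k + t := by omega
    rw [h1, h2]
  · simp only [List.map_cons, List.map_nil]
    have h1 : i - (k + 1) + k = i - 1 := by omega
    have h2 : j - (k + 1) + k = j - 1 := by omega
    rw [h1, h2]


theorem pv_tlGo_spec (grid : List (List Int)) :
    ∀ (k i j : Nat), min i j = k → ∀ s,
      pvTlGo grid ((i : Int) - 1) ((j : Int) - 1) s = PySem.Set.update s (pvPre grid i j).reverse := by
  intro k
  induction k with
  | zero =>
      intro i j h s
      rw [pvTlGo]
      rw [dif_neg (by omega)]
      unfold pvPre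
      rw [h]
      simp [PySem.Set.update_nil]
  | succ k ih =>
      intro i j h s
      rw [pvTlGo]
      rw [dif_pos (by omega)]
      have h1 : (i : Int) - 1 - 1 = ((i - 1 : Nat) : Int) - 1 := by omega
      have h2 : (j : Int) - 1 - 1 = ((j - 1 : Nat) : Int) - 1 := by omega
      have h3 : pvCell grid ((i : Int) - 1) ((j : Int) - 1) = pvG grid (i - 1) (j - 1) := by
        unfold pvG
        have e1 : ((i - 1 : Nat) : Int) = (i : Int) - 1 := by omega
        have e2 : ((j - 1 : Nat) : Int) = (j : Int) - 1 := by omega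
        rw [e1, e2]
      rw [h1, h2, h3, ih (i - 1) (j - 1) (by omega) _]
      rw [pvPre_succ grid h]
      rw [List.reverse_append, List.reverse_singleton, List.singleton_append,
        PySem.Set.update_cons]


theorem pv_brGo_spec (grid : List (List Int)) (m n : Int) :
    ∀ (c : Nat) (p q : Int), c = (min (m - p) (n - q)).toNat → ∀ s,
      pvBrGo grid m n p q s
        = PySem.Set.update s ((List.range c).map (fun (t : Nat) => pvCell grid (p + (t : Int)) (q + (t : Int)))) := by
  intro c
  induction c with
  | zero =>
      intro p q h s
      rw [pvBrGo, dif_neg (by omega)]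
      simp [PySem.Set.update_nil]
  | succ c ih =>
      intro p q h s
      rw [pvBrGo, dif_pos (by omega)]
      rw [ih (p + 1) (q + 1) (by omega) _]
      rw [List.range_succ_eq_map, List.map_cons, List.map_map]
      simp only [Nat.cast_zero, add_zero, PySem.Set.update_cons]
      congr 1
      apply List.map_congr_left
      intro t _
      simp only [Function.comp_apply]
      congr 1 <;> push_cast <;> ring


theorem pv_prefixCounts_aux (l : List Int) :
    ∀ (s : PySem.Set Int) (acc : List Int),
      (l.foldl (fun (st : PySem.Set Int × List Int) v =>
        (PySem.Set.add st.1 v, st.2 ++ [(st.1.length : Int)])) (s, acc)).2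
      = acc ++ (List.range l.length).map (fun t => ((PySem.Set.update s (l.take t)).length : Int)) := by
  induction l with
  | nil => intro s acc; simp
  | cons x l ih =>
      intro s acc
      simp only [List.foldl_cons]
      rw [ih]
      simp only [List.length_cons, List.range_succ_eq_map, List.map_cons, List.map_map,
        List.take_zero, PySem.Set.update_nil, List.append_assoc, List.singleton_append]
      congr 1


theorem pv_prefixCounts_eq (l : List Int) :
    pvPrefixCounts l
      = (List.range l.length).map (fun t => ((PySem.Set.ofList (l.take t)).length : Int)) := by
  unfold pvPrefixCounts
  rw [pv_prefixCounts_aux l PySem.Set.empty []]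
  simp only [List.nil_append]
  apply List.map_congr_left
  intro t _
  rw [show PySem.Set.empty = ([] : PySem.Set Int) from rfl, PySem.Set.update_nil_left]

theorem pv_inner_fill (f : Nat → Int) (n : Nat) (ans : List (List Int)) (i : Nat)
    (hi : i < ans.length) (hlen : n ≤ (ans[i]).length) :
    ∀ c, c ≤ n →
      (List.range c).foldl (fun a (j : Nat) => pvSetCell a (i : Int) (j : Int) (f j)) ans
        = ans.set i ((List.range c).map f ++ (ans[i]).drop c) := by
  intro c
  induction c with
  | zero =>
      intro _
      simp [List.set_getElem_self hi]
  | succ c ih =>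
      intro hc
      rw [List.range_succ, List.foldl_append, ih (by omega)]
      simp only [List.foldl_cons, List.foldl_nil]
      unfold pvSetCell
      have hrowq : (PySem.List.pyGet? (ans.set i ((List.range c).map f ++ (ans[i]).drop c)) (i : Int)).getD []
          = (List.range c).map f ++ (ans[i]).drop c := by
        rw [PySem.List.pyGet?_natCast, List.getElem?_set_self (by simpa using hi)]
        rfl
      rw [hrowq, Int.toNat_natCast, Int.toNat_natCast, List.set_set]
      have hcl : c < (ans[i]).length := by omega
      rw [List.drop_eq_getElem_cons hcl]
      have hpl : ((List.range c).map f).length = c := by simp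
      rw [List.set_append, if_neg (by omega), hpl, Nat.sub_self, List.set_cons_zero]
      simp [List.map_append]

theorem pv_outer_fill (g : Nat → Nat → Int) (n : Nat) (grid : List (List Int))
    (hrows : ∀ row ∈ grid, n ≤ row.length) :
    ∀ t, t ≤ grid.length →
      (List.range t).foldl (fun a (i : Nat) =>
          (List.range n).foldl (fun a' (j : Nat) => pvSetCell a' (i : Int) (j : Int) (g i j)) a) grid
        = (List.range t).map (fun i =>
            (List.range n).map (g i) ++ (grid.getD i []).drop n) ++ grid.drop t := by
  intro t
  induction t with
  | zero => intro _; simp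
  | succ t ih =>
      intro ht
      rw [List.range_succ, List.foldl_append, ih (by omega)]
      simp only [List.foldl_cons, List.foldl_nil]
      set P := (List.range t).map (fun i =>
          (List.range n).map (g i) ++ (grid.getD i []).drop n) ++ grid.drop t with hP
      have hplen : ((List.range t).map (fun i =>
          (List.range n).map (g i) ++ (grid.getD i []).drop n)).length = t := by simp
      have hPlen : P.length = grid.length := by
        rw [hP]; simp; omega
      have htP : t < P.length := by omega
      have hPt : P[t]'htP = grid[t]'(by omega) := by
        have h1 : P[t]? = some (grid[t]'(by omega)) := by
          rw [hP, List.getElem?_append_right (by omega), hplen, Nat.sub_self,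
            List.getElem?_drop, Nat.add_zero, List.getElem?_eq_getElem (by omega)]
        have h2 : P[t]? = some (P[t]'htP) := List.getElem?_eq_getElem htP
        rw [h2] at h1
        exact Option.some.inj h1
      have hrl : n ≤ (P[t]'htP).length := by
        rw [hPt]; exact hrows _ (List.getElem_mem _)
      rw [pv_inner_fill (g t) n P t htP hrl n (le_refl n)]
      rw [hPt]
      rw [hP, List.set_append, if_neg (by omega), hplen, Nat.sub_self]
      rw [List.drop_eq_getElem_cons (show t < grid.length by omega), List.set_cons_zero]
      simp [List.map_append, List.getElem?_eq_getElem (show t < grid.length by omega)]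

theorem pvA_cell (grid : List (List Int)) (n : Nat) (i j : Nat)
    (hi : i < grid.length) (hj : j < n) :
    ((((pvTlGo grid ((i : Int) - 1) ((j : Int) - 1) PySem.Set.empty).length : Int)
      - ((pvBrGo grid (grid.length : Int) (n : Int) ((i : Int) + 1) ((j : Int) + 1) PySem.Set.empty).length : Int)).natAbs : Int)
    = pvVal grid grid.length n i j := by
  rw [pv_tlGo_spec grid (min i j) i j rfl PySem.Set.empty]
  rw [pv_brGo_spec grid (grid.length : Int) (n : Int) (min (grid.length - i) (n - j) - 1)
      ((i : Int) + 1) ((j : Int) + 1) (by omega) PySem.Set.empty]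
  rw [show PySem.Set.empty = ([] : PySem.Set Int) from rfl, PySem.Set.update_nil_left,
    PySem.Set.update_nil_left]
  unfold pvVal
  rw [pv_distinct_len_perm (List.reverse_perm (pvPre grid i j))]
  have hpost : (List.range (min (grid.length - i) (n - j) - 1)).map
      (fun (t : Nat) => pvCell grid ((i : Int) + 1 + (t : Int)) ((j : Int) + 1 + (t : Int)))
      = pvPost grid grid.length n i j := by
    unfold pvPost
    apply List.map_congr_left
    intro t _
    unfold pvG
    congr 1
  rw [hpost]


theorem pvA_eq_table (grid : List (List Int)) (n : Nat)
    (hrows : ∀ row ∈ grid, n ≤ row.length)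
    (hn : ((PySem.List.pyGet? grid 0).getD []).length = n) :
    differenceOfDistinctValues grid = pvTable grid grid.length n := by
  unfold differenceOfDistinctValues
  simp only [hn]
  rw [PySem.List.pyRange_zero_natCast grid.length, PySem.List.pyRange_zero_natCast n]
  simp only [List.foldl_map]
  have h := pv_outer_fill (fun iN jN =>
      ((((pvTlGo grid ((iN : Int) - 1) ((jN : Int) - 1) PySem.Set.empty).length : Int)
        - ((pvBrGo grid (grid.length : Int) (n : Int) ((iN : Int) + 1) ((jN : Int) + 1) PySem.Set.empty).length : Int)).natAbs : Int))
    n grid hrows grid.length (le_refl _)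
  rw [h, List.drop_length, List.append_nil]
  unfold pvTable
  apply List.map_congr_left
  intro i hi
  congr 1
  apply List.map_congr_left
  intro j hj
  exact pvA_cell grid n i j (List.mem_range.mp hi) (List.mem_range.mp hj)


def pvDiagOf (grid : List (List Int)) (m n d : Int) : List Int :=
  (PySem.List.pyRange 0 (min (m - (if d < 0 then -d else 0)) (n - ((if d < 0 then -d else 0) + d)))).map
    (fun k => pvCell grid ((if d < 0 then -d else 0) + k) (((if d < 0 then -d else 0) + d) + k))

def pvTopOf (grid : List (List Int)) (m n d : Int) : List Int := pvPrefixCounts (pvDiagOf grid m n d)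
def pvBotOf (grid : List (List Int)) (m n d : Int) : List Int := (pvPrefixCounts (pvDiagOf grid m n d).reverse).reverse

theorem pv_tb_spec (grid : List (List Int)) (m n : Int) (ds : List Int) :
    ∀ (acc1 acc2 : List (List Int)),
      ds.foldl (fun (tb : List (List Int) × List (List Int)) d =>
          (tb.1 ++ [pvTopOf grid m n d], tb.2 ++ [pvBotOf grid m n d])) (acc1, acc2)
        = (acc1 ++ ds.map (pvTopOf grid m n), acc2 ++ ds.map (pvBotOf grid m n)) := by
  induction ds with
  | nil => intro acc1 acc2; simp
  | cons d ds ih => intro acc1 acc2; simp [ih]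

theorem pv_pyGet_map_pyRange {α : Type} (f : Int → α) (a b e : Int) (he : 0 ≤ e) (heb : a + e < b) :
    PySem.List.pyGet? ((PySem.List.pyRange a b).map f) e = some (f (a + e)) := by
  rw [pv_pyRange_one_eq, List.map_map]
  have h1 : e = ((e.toNat : Nat) : Int) := by omega
  rw [h1, PySem.List.pyGet?_natCast, List.getElem?_map, List.getElem?_range (by omega)]
  simp only [Option.map_some, Function.comp_apply]

theorem pv_LN_eq (m n i j : Nat) (hi : i < m) (hj : j < n) :
    min (m - (i - min i j)) (n - (j - min i j)) = min (m - i) (n - j) + min i j := by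
  rcases Nat.le_total i j with h | h
  · rw [Nat.min_eq_left h]; omega
  · rw [Nat.min_eq_right h]; omega

theorem pv_diagOf_eq (grid : List (List Int)) (n i j : Nat) (hi : i < grid.length) (hj : j < n) :
    pvDiagOf grid (grid.length : Int) (n : Int) ((j : Int) - (i : Int))
      = (List.range (min (grid.length - (i - min i j)) (n - (j - min i j)))).map
          (fun (t : Nat) => pvG grid (i - min i j + t) (j - min i j + t)) := by
  unfold pvDiagOf
  have e0 : (if ((j : Int) - (i : Int)) < 0 then -((j : Int) - (i : Int)) else (0 : Int))
      = ((i - min i j : Nat) : Int) := by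
    split_ifs with h <;> omega
  rw [e0]
  have e1 : ((i - min i j : Nat) : Int) + ((j : Int) - (i : Int)) = ((j - min i j : Nat) : Int) := by
    omega
  rw [e1]
  have e2 : min ((grid.length : Int) - ((i - min i j : Nat) : Int)) ((n : Int) - ((j - min i j : Nat) : Int))
      = ((min (grid.length - (i - min i j)) (n - (j - min i j)) : Nat) : Int) := by
    rcases Nat.le_total i j with h | h
    · rw [Nat.min_eq_left h]; omega
    · rw [Nat.min_eq_right h]; omega
  rw [e2, PySem.List.pyRange_zero_natCast, List.map_map]
  apply List.map_congr_left
  intro t _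
  simp only [Function.comp_apply]
  unfold pvG
  congr 1

theorem pvTop_lookup (grid : List (List Int)) (n i j : Nat) (hi : i < grid.length) (hj : j < n) :
    (PySem.List.pyGet? (pvTopOf grid (grid.length : Int) (n : Int) ((j : Int) - (i : Int))) (min (i : Int) (j : Int))).getD 0
      = ((PySem.Set.ofList (pvPre grid i j)).length : Int) := by
  unfold pvTopOf
  rw [pv_diagOf_eq grid n i j hi hj, pv_prefixCounts_eq]
  have hk : min (i : Int) (j : Int) = ((min i j : Nat) : Int) := by omega
  have hkL : min i j < min (grid.length - (i - min i j)) (n - (j - min i j)) := by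
    rw [pv_LN_eq grid.length n i j hi hj]; omega
  rw [hk, PySem.List.pyGet?_natCast, List.length_map, List.length_range,
    List.getElem?_map, List.getElem?_range hkL]
  simp only [Option.map_some, Option.getD_some]
  congr 1
  rw [← List.map_take, List.take_range, Nat.min_eq_left (Nat.le_of_lt hkL)]
  rfl

theorem pvBot_lookup (grid : List (List Int)) (n i j : Nat) (hi : i < grid.length) (hj : j < n) :
    (PySem.List.pyGet? (pvBotOf grid (grid.length : Int) (n : Int) ((j : Int) - (i : Int))) (min (i : Int) (j : Int))).getD 0
      = ((PySem.Set.ofList (pvPost grid grid.length n i j)).length : Int) := by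
  unfold pvBotOf
  rw [pv_diagOf_eq grid n i j hi hj, pv_prefixCounts_eq]
  rw [pv_LN_eq grid.length n i j hi hj]
  generalize hLN : min (grid.length - i) (n - j) + min i j = LN
  set dg := (List.range LN).map (fun (t : Nat) => pvG grid (i - min i j + t) (j - min i j + t)) with hdg
  have hdglen : dg.length = LN := by rw [hdg]; simp
  have hk : min (i : Int) (j : Int) = ((min i j : Nat) : Int) := by omega
  have hkL : min i j < LN := by omega
  have hmaplen : ((List.range dg.reverse.length).map
      (fun t => ((PySem.Set.ofList (dg.reverse.take t)).length : Int))).length = LN := by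
    simp [hdglen]
  rw [hk, PySem.List.pyGet?_natCast, List.getElem?_reverse (by rw [hmaplen]; exact hkL), hmaplen,
    List.getElem?_map, List.getElem?_range (by simp [hdglen]; omega)]
  simp only [Option.map_some, Option.getD_some]
  have htake : dg.reverse.take (LN - 1 - min i j) = (dg.drop (min i j + 1)).reverse := by
    rw [List.take_reverse, hdglen]
    congr 2
    omega
  rw [htake, pv_distinct_len_perm (List.reverse_perm _)]
  congr 1
  have hdrop : dg.drop (min i j + 1) = pvPost grid grid.length n i j := by
    rw [hdg, ← List.map_drop]
    have hr : (List.range LN).drop (min i j + 1)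
        = (List.range (LN - (min i j + 1))).map (fun t => (min i j + 1) + t) := by
      have hsplit : LN = (min i j + 1) + (LN - (min i j + 1)) := by omega
      rw [hsplit, List.range_add, List.drop_append_of_le_length (by simp)]
      simp
    rw [hr, List.map_map]
    unfold pvPost
    have hlen2 : LN - (min i j + 1) = min (grid.length - i) (n - j) - 1 := by omega
    rw [hlen2]
    apply List.map_congr_left
    intro t _
    simp only [Function.comp_apply]
    congr 1 <;> omega
  rw [hdrop]

theorem pvB_cell (grid : List (List Int)) (n i j : Nat) (hi : i < grid.length) (hj : j < n) :
    (((PySem.List.pyGet? ((PySem.List.pyGet? ((PySem.List.pyRange (1 - (grid.length : Int)) (n : Int)).map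
          (pvTopOf grid (grid.length : Int) (n : Int))) ((j : Int) - (i : Int) + (grid.length : Int) - 1)).getD [])
        (min (i : Int) (j : Int))).getD 0
      - ((PySem.List.pyGet? ((PySem.List.pyGet? ((PySem.List.pyRange (1 - (grid.length : Int)) (n : Int)).map
          (pvBotOf grid (grid.length : Int) (n : Int))) ((j : Int) - (i : Int) + (grid.length : Int) - 1)).getD [])
        (min (i : Int) (j : Int))).getD 0)).natAbs : Int)
      = pvVal grid grid.length n i j := by
  have he : (0 : Int) ≤ (j : Int) - (i : Int) + (grid.length : Int) - 1 := by omega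
  have heb : (1 - (grid.length : Int)) + ((j : Int) - (i : Int) + (grid.length : Int) - 1) < (n : Int) := by omega
  rw [pv_pyGet_map_pyRange _ _ _ _ he heb, pv_pyGet_map_pyRange _ _ _ _ he heb]
  have harg : (1 - (grid.length : Int)) + ((j : Int) - (i : Int) + (grid.length : Int) - 1)
      = (j : Int) - (i : Int) := by ring
  rw [harg]
  simp only [Option.getD_some]
  rw [pvTop_lookup grid n i j hi hj, pvBot_lookup grid n i j hi hj]
  rfl

-- B's result is the table
theorem pvB_eq_table (grid : List (List Int)) (n : Nat)
    (hrows : ∀ row ∈ grid, n ≤ row.length)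
    (hn : ((PySem.List.pyGet? grid 0).getD []).length = n) :
    differenceOfDistinctValues_alt grid = pvTable grid grid.length n := by
  unfold differenceOfDistinctValues_alt
  simp only [hn]
  rw [show (fun (tb : List (List Int) × List (List Int)) (d : Int) =>
      (tb.1 ++ [pvPrefixCounts ((PySem.List.pyRange 0 (min ((grid.length : Int) - (if d < 0 then -d else 0)) ((n : Int) - ((if d < 0 then -d else 0) + d)))).map
        (fun k => pvCell grid ((if d < 0 then -d else 0) + k) (((if d < 0 then -d else 0) + d) + k)))],
       tb.2 ++ [(pvPrefixCounts ((PySem.List.pyRange 0 (min ((grid.length : Int) - (if d < 0 then -d else 0)) ((n : Int) - ((if d < 0 then -d else 0) + d)))).map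
        (fun k => pvCell grid ((if d < 0 then -d else 0) + k) (((if d < 0 then -d else 0) + d) + k))).reverse).reverse]))
      = (fun (tb : List (List Int) × List (List Int)) (d : Int) =>
          (tb.1 ++ [pvTopOf grid (grid.length : Int) (n : Int) d],
           tb.2 ++ [pvBotOf grid (grid.length : Int) (n : Int) d])) from rfl]
  rw [pv_tb_spec grid (grid.length : Int) (n : Int) (PySem.List.pyRange (1 - (grid.length : Int)) (n : Int)) [] []]
  simp only [List.nil_append, List.map_id']
  rw [PySem.List.pyRange_zero_natCast grid.length, PySem.List.pyRange_zero_natCast n]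
  simp only [List.foldl_map]
  have h := pv_outer_fill (fun iN jN =>
      (((PySem.List.pyGet? ((PySem.List.pyGet? ((PySem.List.pyRange (1 - (grid.length : Int)) (n : Int)).map
            (pvTopOf grid (grid.length : Int) (n : Int))) ((jN : Int) - (iN : Int) + (grid.length : Int) - 1)).getD [])
          ((min (iN : Int) (jN : Int)))).getD 0
        - ((PySem.List.pyGet? ((PySem.List.pyGet? ((PySem.List.pyRange (1 - (grid.length : Int)) (n : Int)).map
            (pvBotOf grid (grid.length : Int) (n : Int))) ((jN : Int) - (iN : Int) + (grid.length : Int) - 1)).getD [])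
          ((min (iN : Int) (jN : Int)))).getD 0)).natAbs : Int))
    n grid hrows grid.length (le_refl _)
  rw [h, List.drop_length, List.append_nil]
  unfold pvTable
  apply List.map_congr_left
  intro i hi
  congr 1
  apply List.map_congr_left
  intro j hj
  exact pvB_cell grid n i j (List.mem_range.mp hi) (List.mem_range.mp hj)

-- ===== VERDICT (by name: the statement is the Claim_ definition above) =====
theorem differenceOfDistinctValues_spec : Claim_equal_differenceOfDistinctValues := by
  intro grid _ hpre
  obtain ⟨hne, hrows⟩ := hpre
  unfold Spec_differenceOfDistinctValues
  have hn : ((PySem.List.pyGet? grid 0).getD []).length = (grid.headD []).length := by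
    cases grid with
    | nil => simp at hne
    | cons r t => simp [PySem.List.pyGet?, PySem.List.pyIdx?]
  rw [pvA_eq_table grid (grid.headD []).length hrows hn,
      pvB_eq_table grid (grid.headD []).length hrows hn]
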